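-- pv_equiv track=rewrite | github.com/DentaMind/SmartDentalAI | backend/api/middleware/audit_log.py | _extract_patient_id
-- ===== SOURCE A (Python) =====
-- from typing import Dict, Any, Optional, Callable
--
-- def _extract_patient_id(path: str, body: Dict[str, Any]) -> Optional[str]:
--     """Extract patient ID from the path or request body"""
--     # Check path for patient ID pattern
--     # Example: /api/patients/12345 or /api/charts/12345/dental
--     path_segments = path.split('/')
--     for i, segment in enumerate(path_segments):
--         if segment == "patients" and i < len(path_segments) - 1:
--             # Next segment might be the patient ID
--             potential_id = path_segments[i+1]
--             # Simple validation that it's not another path segment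
--             if potential_id and not potential_id.startswith("api") and "/" not in potential_id:
--                 return potential_id
--
--     # Check request body for patient ID
--     if body and isinstance(body, dict):
--         patient_id = body.get("patient_id")
--         if patient_id:
--             return str(patient_id)
--
--     return None
-- ===== SOURCE B (Python) =====
-- from typing import Dict, Any, Optional
--
--
-- def _extract_patient_id(path: str, body: Dict[str, Any]) -> Optional[str]:
--     """Extract patient ID from the path or request body (raw-string scan, no split)."""
--     # Scan the raw path for "/patients/" boundaries instead of splitting into segments.
--     hay = "/" + path + "/"
--     while True:
--         idx = hay.find("/patients/")
--         if idx == -1: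
--             break
--         rest = hay[idx + 10:]
--         nxt = rest[:rest.find("/")]
--         if nxt and not nxt.startswith("api"):
--             return nxt
--         hay = hay[idx + 1:]
--     patient_id = body.get("patient_id")
--     if patient_id:
--         return str(patient_id)
--     return None
-- ===== Notes on version B (the rewrite author's own statement) =====
-- stated objective: alternative
-- what changed: B never splits the path into a segment list: it scans the raw string for the next "/patients/" boundary with str.find, takes the run of characters up to the following slash as the candidate id, and on a failed candidate resumes the scan just past the matched slash; the body-lookup tail is kept verbatim.
import Mathlib
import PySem

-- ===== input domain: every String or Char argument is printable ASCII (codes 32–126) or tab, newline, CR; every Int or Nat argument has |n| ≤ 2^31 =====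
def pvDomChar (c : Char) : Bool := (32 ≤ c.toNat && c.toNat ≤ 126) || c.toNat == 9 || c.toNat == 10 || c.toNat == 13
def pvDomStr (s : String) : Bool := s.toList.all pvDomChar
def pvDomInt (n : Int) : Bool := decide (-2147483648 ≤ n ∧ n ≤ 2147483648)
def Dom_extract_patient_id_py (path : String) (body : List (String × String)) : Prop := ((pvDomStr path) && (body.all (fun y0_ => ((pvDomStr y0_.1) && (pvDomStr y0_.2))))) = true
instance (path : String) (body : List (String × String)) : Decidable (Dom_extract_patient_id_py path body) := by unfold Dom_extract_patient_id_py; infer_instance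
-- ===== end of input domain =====

-- B scans the raw path for "/patients/" boundaries with str.find instead of splitting into segments; same results, body-lookup tail unchanged.


-- ===== PORT A =====
-- A's 'for i, segment in enumerate(path_segments)' loop, as index recursion
def pvALoop (segs : List (List Char)) (i : Nat) : Option (List Char) :=
  if _h : i < segs.length then
    let segment := segs.getD i []
    if segment = "patients".toList ∧ i < segs.length - 1 then
      let potential := segs.getD (i + 1) []
      if potential ≠ [] ∧ PySem.Chars.startswith potential "api".toList = false ∧
          PySem.Chars.isIn ['/'] potential = false then
        some potential
      else pvALoop segs (i + 1)
    else pvALoop segs (i + 1)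
  else none
termination_by segs.length - i

def extract_patient_id_py (path : String) (body : List (String × String)) : Option String :=
  let path_segments := PySem.Chars.splitOn path.toList ['/']   -- path.split('/')
  match pvALoop path_segments 0 with
  | some cs => some (String.ofList cs)
  | none =>
    -- if body and isinstance(body, dict): … (isinstance is always true under the type convention)
    if body ≠ [] then
      match (PySem.Dict.mk body).get? "patient_id" with
      | some pid => if pid ≠ "" then some pid else none   -- str(pid) = pid: values are strings
      | none => none
    else none

-- ===== PORT B =====
-- B's 'while True' scan of the raw string hay for "/patients/" via str.find
def pvBLoop (hay : List Char) : Option (List Char) :=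
  let idx := PySem.Chars.find hay "/patients/".toList
  if h : idx = -1 then none
  else
    let rest := PySem.Chars.slice hay (some (idx + 10)) none          -- hay[idx+10:]
    let nxt := PySem.Chars.slice rest none (some (PySem.Chars.find rest ['/']))  -- rest[:rest.find("/")]
    if nxt ≠ [] ∧ PySem.Chars.startswith nxt "api".toList = false then some nxt
    else pvBLoop (PySem.Chars.slice hay (some (idx + 1)) none)        -- hay = hay[idx+1:]
termination_by hay.length
decreasing_by
  have h0 : -1 ≤ PySem.Chars.find hay "/patients/".toList := PySem.Chars.neg_one_le_find hay _
  have h1 : "/patients/".toList <:+: hay := by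
    have := PySem.Chars.find_ne_neg_one_iff hay "/patients/".toList
    tauto
  have h2 : ("/patients/".toList).length ≤ hay.length := h1.length_le
  have h3 : ("/patients/".toList).length = 10 := by decide
  simp only [PySem.Chars.slice_eq_listSlice]
  rw [PySem.List.slice_from _ (by omega)]
  simp only [List.length_drop]
  omega

def extract_patient_id_py_alt (path : String) (body : List (String × String)) : Option String :=
  let hay := '/' :: path.toList ++ ['/']   -- "/" + path + "/"
  match pvBLoop hay with
  | some cs => some (String.ofList cs)
  | none =>
    match (PySem.Dict.mk body).get? "patient_id" with
    | some pid => if pid ≠ "" then some pid else none   -- str(pid) = pid: values are strings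
    | none => none

-- ===== PRECONDITION & SPEC =====
def Spec_extract_patient_id_py (path : String) (body : List (String × String)) (out : Option String) : Prop := out = extract_patient_id_py_alt path body
instance (path : String) (body : List (String × String)) (out : Option String) : Decidable (Spec_extract_patient_id_py path body out) := by unfold Spec_extract_patient_id_py; infer_instance

-- ===== CLAIM (what is proved, stated in full; the proofs are below) =====
def Claim_equal_extract_patient_id_py : Prop := ∀ (path : String) (body : List (String × String)), Dom_extract_patient_id_py path body → Spec_extract_patient_id_py path body (extract_patient_id_py path body)

-- ===== LEMMAS AND PROOFS =====

-- common functional spec of both loops: first "patients" segment whose successor is a valid id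
def pvG : List (List Char) → Option (List Char)
  | [] => none
  | a :: rest =>
    if a = "patients".toList then
      let nxt := rest.headD []
      if nxt ≠ [] ∧ PySem.Chars.startswith nxt "api".toList = false then some nxt else pvG rest
    else pvG rest

-- join the segments, a '/' after each one ( = intercalate "/" ss ++ "/")
def pvK : List (List Char) → List Char
  | [] => []
  | a :: rest => a ++ '/' :: pvK rest

-- split on '/', with an explicit accumulated prefix
def pvPadd (pre : List Char) : List Char → List (List Char)
  | [] => [pre]
  | c :: rest => if c = '/' then pre :: pvPadd [] rest else pvPadd (pre ++ [c]) rest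

theorem pvK_nil : pvK [] = [] := rfl
theorem pvK_cons (a : List Char) (r : List (List Char)) : pvK (a :: r) = a ++ '/' :: pvK r := rfl

theorem pv_splitOn_go_eq (fuel : Nat) : ∀ (l cur : List Char) (acc : List (List Char)),
    l.length ≤ fuel →
    PySem.Chars.splitOn.go ['/'] fuel l cur acc = acc.reverse ++ pvPadd cur.reverse l := by
  induction fuel with
  | zero =>
    intro l cur acc h
    have hl : l = [] := by cases l <;> simp_all
    subst hl
    rw [PySem.Chars.splitOn.go.eq_def]
    simp [pvPadd]
  | succ n ih =>
    intro l cur acc h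
    cases l with
    | nil =>
      rw [PySem.Chars.splitOn.go.eq_def]
      simp [pvPadd]
    | cons c rest =>
      rw [PySem.Chars.splitOn.go.eq_def]
      by_cases hc : c = '/'
      · subst hc
        have hpre : (['/'] : List Char).isPrefixOf ('/' :: rest) = true := by
          simp [List.isPrefixOf]
        simp only [hpre, if_true, List.length_cons, List.length_nil, List.drop_succ_cons,
          List.drop_zero]
        rw [ih rest [] (cur.reverse :: acc) (by simpa using h)]
        simp [pvPadd]
      · have hpre : (['/'] : List Char).isPrefixOf (c :: rest) = false := by
          simp only [List.isPrefixOf, Bool.and_true]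
          exact decide_eq_false (fun hcontra => hc hcontra.symm)
        simp only [hpre, Bool.false_eq_true, if_false]
        rw [ih rest (c :: cur) acc (by simpa using h)]
        simp only [pvPadd, if_neg hc, List.reverse_cons]

theorem pv_splitOn_eq_padd (l : List Char) : PySem.Chars.splitOn l ['/'] = pvPadd [] l := by
  rw [PySem.Chars.splitOn, pv_splitOn_go_eq (l.length + 1) l [] [] (by omega)]
  simp

theorem pv_padd_no_slash (l : List Char) : ∀ (pre : List Char), '/' ∉ pre →
    ∀ s ∈ pvPadd pre l, '/' ∉ s := by
  induction l with
  | nil => intro pre hpre s hs; simp [pvPadd] at hs; subst hs; exact hpre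
  | cons c rest ih =>
    intro pre hpre s hs
    by_cases hc : c = '/'
    · subst hc
      simp only [pvPadd] at hs
      rcases List.mem_cons.1 hs with rfl | hs
      · exact hpre
      · exact ih [] (by simp) s hs
    · simp only [pvPadd, if_neg hc] at hs
      refine ih (pre ++ [c]) ?_ s hs
      simp only [List.mem_append, List.mem_singleton]
      rintro (h | h)
      · exact hpre h
      · exact hc h.symm

theorem pv_padd_K (l : List Char) : ∀ (pre : List Char), pvK (pvPadd pre l) = pre ++ l ++ ['/'] := by
  induction l with
  | nil => intro pre; simp [pvPadd, pvK]
  | cons c rest ih =>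
    intro pre
    by_cases hc : c = '/'
    · subst hc
      simp only [pvPadd, if_true, pvK_cons]
      rw [ih []]
      simp
    · simp only [pvPadd, if_neg hc]
      rw [ih (pre ++ [c])]
      simp

theorem pv_no_pre (p a t : List Char) (hp : p.head? = some '/') (ha : '/' ∉ a) :
    ∀ i < a.length, ¬ p <+: (a ++ t).drop i := by
  intro i hi hpre
  have hdrop : (a ++ t).drop i = a.drop i ++ t := List.drop_append_of_le_length (by omega)
  have hne : a.drop i ≠ [] := by
    intro h; rw [List.drop_eq_nil_iff] at h; omega
  have hhead : ((a ++ t).drop i).head? = a[i]? := by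
    rw [hdrop, List.head?_append_of_ne_nil _ hne, List.head?_drop]
  obtain ⟨q, hq⟩ := hpre
  have hslash : ((a ++ t).drop i).head? = some '/' := by
    rw [← hq]
    cases p with
    | nil => simp at hp
    | cons x xs => simp at hp ⊢; exact hp
  rw [hhead] at hslash
  have : a[i]'hi = '/' := by
    have := List.getElem?_eq_getElem hi
    rw [this] at hslash; exact (Option.some_inj.1 hslash)
  exact ha (this ▸ List.getElem_mem hi)

theorem pv_find_eq (s sub : List Char) (k : Nat) (hk : sub <+: s.drop k)
    (hmin : ∀ i < k, ¬ sub <+: s.drop i) : PySem.Chars.find s sub = (k : Int) := by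
  have hinf : sub <:+: s := hk.isInfix.trans (List.drop_suffix k s).isInfix
  have h0 : 0 ≤ PySem.Chars.find s sub := (PySem.Chars.find_nonneg_iff s sub).2 hinf
  obtain ⟨hpre, hmin'⟩ := PySem.Chars.find_spec (s := s) (sub := sub) h0
  rcases lt_trichotomy (PySem.Chars.find s sub).toNat k with h | h | h
  · exact absurd hpre (hmin _ h)
  · omega
  · exact absurd hk (hmin' k h)

theorem pv_find_shift (a t sub : List Char) (hh : ∀ i < a.length, ¬ sub <+: (a ++ t).drop i) :
    PySem.Chars.find (a ++ t) sub =
      if PySem.Chars.find t sub = -1 then -1 else (a.length : Int) + PySem.Chars.find t sub := by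
  by_cases hr : PySem.Chars.find t sub = -1
  · rw [if_pos hr]
    rw [PySem.Chars.find_eq_neg_one_iff] at hr ⊢
    intro hinf
    have : PySem.Chars.isIn sub (a ++ t) = true := (PySem.Chars.isIn_iff_infix sub (a ++ t)).2 hinf
    obtain ⟨j, hj⟩ := (PySem.Chars.exists_prefix_drop_iff_isIn sub (a ++ t)).2 this
    by_cases hja : j < a.length
    · exact hh j hja hj
    · rw [show j = a.length + (j - a.length) by omega, List.drop_length_add_append] at hj
      exact hr (hj.isInfix.trans (List.drop_suffix _ t).isInfix)
  · rw [if_neg hr]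
    have h0 : 0 ≤ PySem.Chars.find t sub := by
      have := PySem.Chars.neg_one_le_find t sub; omega
    obtain ⟨hpre, hmin⟩ := PySem.Chars.find_spec (s := t) (sub := sub) h0
    have := pv_find_eq (a ++ t) sub (a.length + (PySem.Chars.find t sub).toNat)
      (by rw [List.drop_length_add_append]; exact hpre)
      (by
        intro i hi hcontra
        by_cases hia : i < a.length
        · exact hh i hia hcontra
        · rw [show i = a.length + (i - a.length) by omega, List.drop_length_add_append] at hcontra
          exact hmin (i - a.length) (by omega) hcontra)
    rw [this]
    omega

theorem pv_slash_pre (u : List Char) : ∀ (b t : List Char), '/' ∉ u → '/' ∉ b →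
    (u ++ ['/']) <+: (b ++ '/' :: t) → u = b := by
  induction u with
  | nil =>
    intro b t _ hb h
    cases b with
    | nil => rfl
    | cons d b' =>
      exfalso
      simp only [List.nil_append, List.cons_append, List.cons_prefix_cons] at h
      exact hb (by rw [← h.1]; exact List.mem_cons_self)
  | cons c u' ih =>
    intro b t hu hb h
    cases b with
    | nil =>
      exfalso
      simp only [List.cons_append, List.nil_append, List.cons_prefix_cons] at h
      exact hu (by rw [h.1]; exact List.mem_cons_self)
    | cons d b' =>
      simp only [List.cons_append, List.cons_prefix_cons] at h
      have hu' : '/' ∉ u' := fun hx => hu (List.mem_cons_of_mem _ hx)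
      have hb' : '/' ∉ b' := fun hx => hb (List.mem_cons_of_mem _ hx)
      rw [h.1, ih b' t hu' hb' h.2]

-- the candidate-id computation rest[:rest.find("/")] of B
def pvNxt (rest : List Char) : List Char :=
  PySem.Chars.slice rest none (some (PySem.Chars.find rest ['/']))

theorem pvBLoop_notfound (hay : List Char)
    (h : PySem.Chars.find hay "/patients/".toList = -1) : pvBLoop hay = none := by
  rw [pvBLoop]
  simp only [h, dite_eq_ite, if_true]

theorem pvBLoop_found (hay : List Char) (k : Nat)
    (h : PySem.Chars.find hay "/patients/".toList = (k : Int)) :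
    pvBLoop hay =
      if pvNxt (hay.drop (k + 10)) ≠ [] ∧
          PySem.Chars.startswith (pvNxt (hay.drop (k + 10))) "api".toList = false then
        some (pvNxt (hay.drop (k + 10)))
      else pvBLoop (hay.drop (k + 1)) := by
  rw [pvBLoop]
  have hne : ((k : Int) = -1) = False := by simp
  simp only [h, dite_eq_ite, hne, if_false]
  have e10 : (k : Int) + 10 = ((k + 10 : Nat) : Int) := by push_cast; ring
  have e1 : (k : Int) + 1 = ((k + 1 : Nat) : Int) := by push_cast; ring
  simp only [e10, e1, PySem.Chars.slice_eq_listSlice, PySem.List.slice_from_natCast, pvNxt,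
    PySem.Chars.slice_eq_listSlice]

theorem pv_nxt_seg (c x : List Char) (hc : '/' ∉ c) : pvNxt (c ++ '/' :: x) = c := by
  have hfind : PySem.Chars.find (c ++ '/' :: x) ['/'] = (c.length : Int) := by
    refine pv_find_eq _ _ c.length ?_ (pv_no_pre ['/'] c ('/' :: x) rfl hc)
    rw [show (c ++ '/' :: x).drop c.length = '/' :: x from List.drop_left]
    exact ⟨x, rfl⟩
  rw [pvNxt, hfind]
  simp only [PySem.Chars.slice_eq_listSlice, PySem.List.slice_to_natCast]
  exact List.take_left

theorem pv_Bloop_shift (pre t : List Char)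
    (hh : ∀ i < pre.length, ¬ "/patients/".toList <+: (pre ++ t).drop i) :
    pvBLoop (pre ++ t) = pvBLoop t := by
  have hf := pv_find_shift pre t "/patients/".toList hh
  by_cases hr : PySem.Chars.find t "/patients/".toList = -1
  · rw [pvBLoop_notfound _ (by rw [hf, if_pos hr]), pvBLoop_notfound _ hr]
  · have hr0 : 0 ≤ PySem.Chars.find t "/patients/".toList := by
      have := PySem.Chars.neg_one_le_find t "/patients/".toList; omega
    have hkt : PySem.Chars.find t "/patients/".toList =
        ((PySem.Chars.find t "/patients/".toList).toNat : Int) := (Int.toNat_of_nonneg hr0).symm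
    set k := (PySem.Chars.find t "/patients/".toList).toNat with hkdef
    have h1 : PySem.Chars.find (pre ++ t) "/patients/".toList = ((pre.length + k : Nat) : Int) := by
      rw [hf, if_neg hr, hkt]; push_cast; ring
    rw [pvBLoop_found _ _ h1, pvBLoop_found _ _ hkt]
    have hd10 : (pre ++ t).drop (pre.length + k + 10) = t.drop (k + 10) := by
      rw [show pre.length + k + 10 = pre.length + (k + 10) by ring, List.drop_length_add_append]
    have hd1 : (pre ++ t).drop (pre.length + k + 1) = t.drop (k + 1) := by
      rw [show pre.length + k + 1 = pre.length + (k + 1) by ring, List.drop_length_add_append]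
    rw [hd10, hd1]

theorem pv_B_eq_g (ss : List (List Char)) : ∀ (a : List Char), '/' ∉ a →
    (∀ s ∈ ss, '/' ∉ s) → pvBLoop (a ++ '/' :: pvK ss) = pvG ss := by
  induction ss with
  | nil =>
    intro a ha _
    refine pvBLoop_notfound _ ?_
    rw [pv_find_shift a ('/' :: pvK []) _ (pv_no_pre _ a _ (by decide) ha)]
    rw [if_pos (by rw [pvK_nil]; decide)]
  | cons b rest ih =>
    intro a ha hfree
    have hb : '/' ∉ b := hfree b List.mem_cons_self
    have hfree' : ∀ s ∈ rest, '/' ∉ s := fun s hs => hfree s (List.mem_cons_of_mem _ hs)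
    by_cases hpat : b = "patients".toList
    · subst hpat
      have hshape : a ++ '/' :: pvK ("patients".toList :: rest) =
          a ++ ("/patients/".toList ++ pvK rest) := by
        rw [pvK_cons]; rfl
      rw [hshape]
      have hfind : PySem.Chars.find (a ++ ("/patients/".toList ++ pvK rest))
          "/patients/".toList = (a.length : Int) := by
        refine pv_find_eq _ _ a.length ?_ (pv_no_pre _ a _ (by decide) ha)
        rw [show (a ++ ("/patients/".toList ++ pvK rest)).drop a.length =
          "/patients/".toList ++ pvK rest from List.drop_left]
        exact List.prefix_append _ _
      rw [pvBLoop_found _ _ hfind]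
      have hdrop10 : (a ++ ("/patients/".toList ++ pvK rest)).drop (a.length + 10) = pvK rest := by
        rw [← List.append_assoc,
          show a.length + 10 = (a ++ "/patients/".toList).length by simp, List.drop_left]
      have hdrop1 : (a ++ ("/patients/".toList ++ pvK rest)).drop (a.length + 1) =
          "patients".toList ++ '/' :: pvK rest := by
        have hsp : a ++ ("/patients/".toList ++ pvK rest) =
            (a ++ ['/']) ++ ("patients".toList ++ '/' :: pvK rest) := by simp
        rw [hsp, show a.length + 1 = (a ++ ['/']).length by simp, List.drop_left]
      rw [hdrop10, hdrop1]
      have hrec := ih "patients".toList (by decide) hfree'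
      cases rest with
      | nil =>
        have hnxt : pvNxt (pvK []) = [] := by rw [pvK_nil]; decide
        rw [hnxt, if_neg (by simp)]
        rw [hrec]
        simp [pvG]
      | cons c rest' =>
        have hc : '/' ∉ c := hfree' c List.mem_cons_self
        rw [pvK_cons, pv_nxt_seg c _ hc, ← pvK_cons]
        have hg : pvG ("patients".toList :: c :: rest') =
          if c ≠ [] ∧ PySem.Chars.startswith c "api".toList = false then some c
          else pvG (c :: rest') := by simp [pvG]
        rw [hg]
        split_ifs with hcond
        · rfl
        · exact hrec
    · have hshape : a ++ '/' :: pvK (b :: rest) = (a ++ '/' :: b) ++ '/' :: pvK rest := by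
        rw [pvK_cons]; simp
      rw [hshape]
      have hh : ∀ i < (a ++ '/' :: b).length,
          ¬ "/patients/".toList <+: ((a ++ '/' :: b) ++ '/' :: pvK rest).drop i := by
        intro i hi hp
        rcases lt_trichotomy i a.length with h1 | h1 | h1
        · refine pv_no_pre "/patients/".toList a ('/' :: (b ++ '/' :: pvK rest))
            (by decide) ha i h1 ?_
          simpa using hp
        · have hdr : ((a ++ '/' :: b) ++ '/' :: pvK rest).drop a.length =
              '/' :: (b ++ '/' :: pvK rest) := by
            have hsp : (a ++ '/' :: b) ++ '/' :: pvK rest =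
                a ++ ('/' :: (b ++ '/' :: pvK rest)) := by simp
            rw [hsp, List.drop_left]
          rw [h1, hdr] at hp
          have hPe : "/patients/".toList = '/' :: ("patients".toList ++ ['/']) := by decide
          rw [hPe] at hp
          have hp2 := (List.cons_prefix_cons.1 hp).2
          exact hpat (pv_slash_pre _ b _ (by decide) hb hp2).symm
        · have hj : i - a.length - 1 < b.length := by
            simp only [List.length_append, List.length_cons] at hi; omega
          have hdr : ((a ++ '/' :: b) ++ '/' :: pvK rest).drop i =
              (b ++ '/' :: pvK rest).drop (i - a.length - 1) := by
            have hsp : (a ++ '/' :: b) ++ '/' :: pvK rest =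
                (a ++ ['/']) ++ (b ++ '/' :: pvK rest) := by simp
            rw [hsp]
            have hieq : i = (a ++ ['/']).length + (i - a.length - 1) := by simp; omega
            conv_lhs => rw [hieq]
            exact List.drop_length_add_append _
          rw [hdr] at hp
          exact pv_no_pre _ b ('/' :: pvK rest) (by decide) hb _ hj hp
      rw [pv_Bloop_shift _ _ hh]
      have hnil := ih [] (by simp) hfree'
      simp only [List.nil_append] at hnil
      rw [hnil]
      have hgb : pvG (b :: rest) = pvG rest := by simp only [pvG, if_neg hpat]
      rw [hgb]

theorem pv_singleton_isIn_false (c : Char) (l : List Char) (h : c ∉ l) :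
    PySem.Chars.isIn [c] l = false := by
  rw [PySem.Chars.isIn_eq_false_iff]
  intro hinf
  exact h ((List.singleton_infix_iff c l).1 hinf)

theorem pv_aLoop_eq_g (segs : List (List Char)) (hfree : ∀ s ∈ segs, '/' ∉ s) :
    ∀ (n i : Nat), segs.length - i ≤ n → pvALoop segs i = pvG (segs.drop i) := by
  intro n
  induction n with
  | zero =>
    intro i h
    rw [pvALoop, dif_neg (by omega), List.drop_eq_nil_iff.2 (by omega)]
    rfl
  | succ n ih =>
    intro i h
    by_cases hi : i < segs.length
    · have hcons : segs.drop i = segs[i] :: segs.drop (i + 1) := List.drop_eq_getElem_cons hi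
      have hgetD : segs.getD i [] = segs[i] := List.getD_eq_getElem segs [] hi
      rw [pvALoop, dif_pos hi, hcons]
      by_cases hseg : segs[i] = "patients".toList
      · by_cases hlast : i < segs.length - 1
        · have hi1 : i + 1 < segs.length := by omega
          have hcons1 : segs.drop (i + 1) = segs[i + 1] :: segs.drop (i + 2) :=
            List.drop_eq_getElem_cons hi1
          have hgetD1 : segs.getD (i + 1) [] = segs[i + 1] := List.getD_eq_getElem segs [] hi1
          have hmem : segs[i + 1] ∈ segs := List.getElem_mem hi1
          have hIsIn : PySem.Chars.isIn ['/'] segs[i + 1] = false :=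
            pv_singleton_isIn_false '/' _ (hfree _ hmem)
          have hhd : (segs.drop (i + 1)).headD [] = segs[i + 1] := by rw [hcons1]; rfl
          rw [if_pos ⟨hgetD ▸ hseg, hlast⟩, hgetD1]
          simp only [pvG, if_pos hseg, hhd]
          by_cases hcond : segs[i + 1] ≠ [] ∧
              PySem.Chars.startswith segs[i + 1] "api".toList = false
          · rw [if_pos ⟨hcond.1, hcond.2, hIsIn⟩, if_pos hcond]
          · have hcond' : ¬ (segs[i + 1] ≠ [] ∧
                PySem.Chars.startswith segs[i + 1] "api".toList = false ∧
                PySem.Chars.isIn ['/'] segs[i + 1] = false) := by tauto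
            rw [if_neg hcond', if_neg hcond, ih (i + 1) (by omega)]
        · have hdrop1 : segs.drop (i + 1) = [] := List.drop_eq_nil_iff.2 (by omega)
          rw [if_neg (by intro hc; exact hlast hc.2), ih (i + 1) (by omega), hdrop1]
          simp only [pvG, if_pos hseg, List.headD_nil]
          rw [if_neg (by simp)]
      · rw [if_neg (by intro hc; exact hseg (hgetD ▸ hc.1)), ih (i + 1) (by omega)]
        simp only [pvG, if_neg hseg]
    · rw [pvALoop, dif_neg hi, List.drop_eq_nil_iff.2 (by omega)]
      rfl

theorem extract_patient_id_py_spec : Claim_equal_extract_patient_id_py := by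
  intro path body _
  unfold Spec_extract_patient_id_py
  have hsegs : PySem.Chars.splitOn path.toList ['/'] = pvPadd [] path.toList :=
    pv_splitOn_eq_padd _
  have hfree : ∀ s ∈ pvPadd [] path.toList, '/' ∉ s := pv_padd_no_slash _ [] (by simp)
  have hA : pvALoop (PySem.Chars.splitOn path.toList ['/']) 0 = pvG (pvPadd [] path.toList) := by
    rw [hsegs]
    have := pv_aLoop_eq_g (pvPadd [] path.toList) hfree (pvPadd [] path.toList).length 0
      (by omega)
    simpa using this
  have hB : pvBLoop ('/' :: path.toList ++ ['/']) = pvG (pvPadd [] path.toList) := by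
    have hk : pvK (pvPadd [] path.toList) = path.toList ++ ['/'] := by rw [pv_padd_K]; simp
    have hmain := pv_B_eq_g (pvPadd [] path.toList) [] (by simp) hfree
    rw [hk] at hmain
    simpa using hmain
  simp only [extract_patient_id_py, extract_patient_id_py_alt]
  rw [hA, hB]
  cases hG : pvG (pvPadd [] path.toList) with
  | some cs => rfl
  | none =>
    by_cases hb : body = []
    · subst hb
      rfl
    · rw [if_pos hb]
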